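-- pv_equiv track=rewrite | github.com/agimin-droid/Advanced_Analytics | mlr_utils/model_computation.py | sort_coefficients_by_type
-- ===== SOURCE A (Python) =====
-- def sort_coefficients_by_type(coef_names):
--     """
--     Sort coefficient names in standard order:
--     1. Linear terms (no * or ^)
--     2. Interaction terms (contains *)
--     3. Quadratic terms (contains ^2)
--
--     Args:
--         coef_names: list of coefficient name strings
--
--     Returns:
--         sorted_names: list sorted by term type, maintaining alphabetical within each group
--     """
--     linear = []
--     interactions = []
--     quadratic = []
--
--     for name in coef_names:
--         if '^2' in name or ('^' in name and '2' in name):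
--             quadratic.append(name)
--         elif '*' in name:
--             interactions.append(name)
--         else:
--             linear.append(name)
--
--     # Sort each group alphabetically for consistency
--     linear.sort()
--     interactions.sort()
--     quadratic.sort()
--
--     # Combine in correct order
--     sorted_names = linear + interactions + quadratic
--     return sorted_names
-- ===== SOURCE B (Python) =====
-- def sort_coefficients_by_type(coef_names):
--     def group(name):
--         if '^2' in name or ('^' in name and '2' in name):
--             return 2
--         if '*' in name:
--             return 1
--         return 0
--     return sorted(coef_names, key=lambda name: (group(name), name))
-- ===== Notes on version B (the rewrite author's own statement) =====
-- stated objective: idiomatic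
-- what changed: Replaces the three-bucket partition with three separate sorts and a concatenation by a single sorted() call keyed on the tuple (group_index, name).
import Mathlib
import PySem

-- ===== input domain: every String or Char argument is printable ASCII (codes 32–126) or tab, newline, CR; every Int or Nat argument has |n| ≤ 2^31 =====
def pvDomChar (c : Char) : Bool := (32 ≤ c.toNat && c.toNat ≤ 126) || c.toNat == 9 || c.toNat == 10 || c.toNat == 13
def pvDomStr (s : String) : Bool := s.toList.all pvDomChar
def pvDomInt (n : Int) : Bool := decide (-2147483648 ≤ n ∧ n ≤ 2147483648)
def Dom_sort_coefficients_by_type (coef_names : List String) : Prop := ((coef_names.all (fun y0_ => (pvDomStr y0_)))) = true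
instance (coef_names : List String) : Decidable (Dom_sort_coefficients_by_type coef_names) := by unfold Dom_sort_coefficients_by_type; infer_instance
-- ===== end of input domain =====

-- B replaces A's three-bucket partition + three sorts + concatenation by one sorted() call
-- keyed on the tuple (group_index, name); objective: idiomatic (same asymptotic cost).

-- ===== PORT A =====
-- A: classify each name into three lists, sort each alphabetically, concatenate.
def sort_coefficients_by_type (coef_names : List String) : List String :=
  let acc := coef_names.foldl
    (fun (acc : List String × List String × List String) name =>
      if PySem.Str.isIn "^2" name || (PySem.Str.isIn "^" name && PySem.Str.isIn "2" name) then
        (acc.1, acc.2.1, acc.2.2 ++ [name])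
      else if PySem.Str.isIn "*" name then
        (acc.1, acc.2.1 ++ [name], acc.2.2)
      else
        (acc.1 ++ [name], acc.2.1, acc.2.2))
    ([], [], [])
  PySem.List.sorted acc.1 (fun x => x) ++ PySem.List.sorted acc.2.1 (fun x => x)
    ++ PySem.List.sorted acc.2.2 (fun x => x)

-- ===== PORT B =====
-- B-side helper: the group index of a coefficient name (same classification test as A's branch).
def pvGroup (name : String) : Nat :=
  if PySem.Str.isIn "^2" name || (PySem.Str.isIn "^" name && PySem.Str.isIn "2" name) then 2
  else if PySem.Str.isIn "*" name then 1
  else 0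

def sort_coefficients_by_type_alt (coef_names : List String) : List String :=
  PySem.List.sorted2 coef_names (fun name => pvGroup name) (fun name => name)

-- ===== PRECONDITION & SPEC =====
def Spec_sort_coefficients_by_type (coef_names : List String) (out : List String) : Prop := out = sort_coefficients_by_type_alt coef_names
instance (coef_names : List String) (out : List String) : Decidable (Spec_sort_coefficients_by_type coef_names out) := by unfold Spec_sort_coefficients_by_type; infer_instance

-- ===== CLAIM (what is proved, stated in full; the proofs are below) =====
def Claim_equal_sort_coefficients_by_type : Prop := ∀ (coef_names : List String), Dom_sort_coefficients_by_type coef_names → Spec_sort_coefficients_by_type coef_names (sort_coefficients_by_type coef_names)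

-- ===== LEMMAS AND PROOFS =====

-- the lexicographic key B sorts by
def pvKey (name : String) : Lex (Nat × String) := toLex (pvGroup name, name)

lemma pvKey_injective : Function.Injective pvKey := by
  intro a b h
  have := congrArg (fun p : Lex (Nat × String) => (ofLex p).2) h
  simpa [pvKey] using this

-- the value of pvGroup on each of A's branches
lemma pvGroup_quad (n : String)
    (h1 : (PySem.Str.isIn "^2" n || (PySem.Str.isIn "^" n && PySem.Str.isIn "2" n)) = true) :
    pvGroup n = 2 := by
  unfold pvGroup; simp only [h1, reduceIte]

lemma pvGroup_inter (n : String)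
    (h1 : (PySem.Str.isIn "^2" n || (PySem.Str.isIn "^" n && PySem.Str.isIn "2" n)) = false)
    (h2 : PySem.Str.isIn "*" n = true) :
    pvGroup n = 1 := by
  unfold pvGroup; simp only [h1, h2, Bool.false_eq_true, reduceIte]

lemma pvGroup_lin (n : String)
    (h1 : (PySem.Str.isIn "^2" n || (PySem.Str.isIn "^" n && PySem.Str.isIn "2" n)) = false)
    (h2 : PySem.Str.isIn "*" n = false) :
    pvGroup n = 0 := by
  unfold pvGroup; simp only [h1, h2, Bool.false_eq_true, reduceIte]

lemma pvGroup_cases (n : String) : pvGroup n = 0 ∨ pvGroup n = 1 ∨ pvGroup n = 2 := by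
  unfold pvGroup; split_ifs <;> simp

-- A's loop builds exactly the three pvGroup-filters of the input
lemma pvFoldA (xs : List String) (l i q : List String) :
    xs.foldl
      (fun (acc : List String × List String × List String) name =>
        if PySem.Str.isIn "^2" name || (PySem.Str.isIn "^" name && PySem.Str.isIn "2" name) then
          (acc.1, acc.2.1, acc.2.2 ++ [name])
        else if PySem.Str.isIn "*" name then
          (acc.1, acc.2.1 ++ [name], acc.2.2)
        else
          (acc.1 ++ [name], acc.2.1, acc.2.2))
      (l, i, q)
    = (l ++ xs.filter (fun n => pvGroup n == 0),
       i ++ xs.filter (fun n => pvGroup n == 1),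
       q ++ xs.filter (fun n => pvGroup n == 2)) := by
  induction xs generalizing l i q with
  | nil => simp
  | cons n t ih =>
    simp only [List.foldl_cons, List.filter_cons]
    by_cases h1 : (PySem.Str.isIn "^2" n || (PySem.Str.isIn "^" n && PySem.Str.isIn "2" n)) = true
    · have g := pvGroup_quad n h1
      simp only [h1, reduceIte, g, ih]
      simp [List.append_assoc]
    · rw [Bool.not_eq_true] at h1
      by_cases h2 : PySem.Str.isIn "*" n = true
      · have g := pvGroup_inter n h1 h2
        simp only [h1, h2, Bool.false_eq_true, reduceIte, g, ih]
        simp [List.append_assoc]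
      · rw [Bool.not_eq_true] at h2
        have g := pvGroup_lin n h1 h2
        simp only [h1, h2, Bool.false_eq_true, reduceIte, g, ih]
        simp [List.append_assoc]

-- the three filters are a partition of the input, up to permutation
lemma pvPartPerm (xs : List String) :
    (xs.filter (fun n => pvGroup n == 0) ++ xs.filter (fun n => pvGroup n == 1)
      ++ xs.filter (fun n => pvGroup n == 2)).Perm xs := by
  induction xs with
  | nil => simp
  | cons n t ih =>
    rcases pvGroup_cases n with h | h | h
    · simpa [List.filter_cons, h] using ih.cons n
    · simp only [List.filter_cons, h]
      simp only [Nat.reduceBEq, Bool.false_eq_true, if_false, if_true]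
      have e : t.filter (fun n => pvGroup n == 0) ++ (n :: t.filter (fun n => pvGroup n == 1))
            ++ t.filter (fun n => pvGroup n == 2)
          = t.filter (fun n => pvGroup n == 0) ++ n :: (t.filter (fun n => pvGroup n == 1)
            ++ t.filter (fun n => pvGroup n == 2)) := by simp
      rw [e]
      refine List.perm_middle.trans (List.Perm.cons n ?_)
      rw [← List.append_assoc]
      exact ih
    · simp only [List.filter_cons, h]
      simp only [Nat.reduceBEq, Bool.false_eq_true, if_false, if_true]
      exact List.perm_middle.trans (List.Perm.cons n ih)

-- B's sorted2 is sorting by the lexicographic key pvKey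
lemma pvBeforeEq :
    (fun (a b : String) => decide (pvGroup a < pvGroup b)
        || (!decide (pvGroup b < pvGroup a) && decide (a < b)))
    = (fun a b => decide (pvKey a < pvKey b)) := by
  funext a b
  simp only [pvKey, Prod.Lex.toLex_lt_toLex, Bool.decide_or, Bool.decide_and]
  by_cases hab : pvGroup a < pvGroup b
  · simp [hab]
  · have : (pvGroup a = pvGroup b) ↔ ¬ (pvGroup b < pvGroup a) := by omega
    simp [hab, this, ← decide_not]

lemma pvAltEq (xs : List String) :
    sort_coefficients_by_type_alt xs = PySem.List.sorted xs pvKey := by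
  rw [PySem.List.sorted_eq_foldl_insertBy]
  rw [← pvBeforeEq]
  rfl

lemma pvMemGroup (k : Nat) (xs : List String) (x : String)
    (hx : x ∈ PySem.List.sorted (xs.filter (fun n => pvGroup n == k)) (fun y => y)) :
    pvGroup x = k := by
  have := (PySem.List.mem_sorted _ _ _ _).mp hx
  simp only [List.mem_filter, beq_iff_eq] at this
  exact this.2

-- A's output is pairwise nondecreasing in pvKey
lemma pvPairwiseA (xs : List String) :
    (sort_coefficients_by_type xs).Pairwise (fun a b => pvKey a ≤ pvKey b) := by
  unfold sort_coefficients_by_type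
  rw [pvFoldA]
  simp only [List.nil_append]
  have key_of_le : ∀ (j k : Nat) (a b : String), pvGroup a = j → pvGroup b = k → j < k →
      pvKey a ≤ pvKey b := by
    intro j k a b ha hb hjk
    exact Prod.Lex.toLex_le_toLex.mpr (Or.inl (by simp [ha, hb]; omega))
  have sorted_pw : ∀ (k : Nat),
      (PySem.List.sorted (xs.filter (fun n => pvGroup n == k)) (fun y => y)).Pairwise
        (fun a b => pvKey a ≤ pvKey b) := by
    intro k
    have := PySem.List.sorted_pairwise (xs.filter (fun n => pvGroup n == k)) (fun y : String => y)
    refine this.imp_of_mem ?_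
    intro a b ha hb hab
    have ga := pvMemGroup k _ _ ha
    have gb := pvMemGroup k _ _ hb
    exact Prod.Lex.toLex_le_toLex.mpr (Or.inr ⟨by simp [ga, gb], hab⟩)
  rw [List.append_assoc, List.pairwise_append]
  refine ⟨sorted_pw 0, ?_, ?_⟩
  · rw [List.pairwise_append]
    refine ⟨sorted_pw 1, sorted_pw 2, ?_⟩
    intro a ha b hb
    exact key_of_le 1 2 a b (pvMemGroup 1 _ _ ha) (pvMemGroup 2 _ _ hb) (by omega)
  · intro a ha b hb
    rcases List.mem_append.mp hb with hb | hb
    · exact key_of_le 0 1 a b (pvMemGroup 0 _ _ ha) (pvMemGroup 1 _ _ hb) (by omega)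
    · exact key_of_le 0 2 a b (pvMemGroup 0 _ _ ha) (pvMemGroup 2 _ _ hb) (by omega)

-- A's output is a permutation of the input
lemma pvPermA (xs : List String) : (sort_coefficients_by_type xs).Perm xs := by
  unfold sort_coefficients_by_type
  rw [pvFoldA]
  simp only [List.nil_append]
  refine List.Perm.trans ?_ (pvPartPerm xs)
  exact (((PySem.List.sorted_perm _ (fun x : String => x) false).append
      (PySem.List.sorted_perm _ (fun x : String => x) false)).append
    (PySem.List.sorted_perm _ (fun x : String => x) false))

-- ===== VERDICT (by name: the statement is the Claim_ definition above) =====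
theorem sort_coefficients_by_type_spec : Claim_equal_sort_coefficients_by_type := by
  intro xs _
  unfold Spec_sort_coefficients_by_type
  rw [pvAltEq]
  refine PySem.List.eq_of_perm_of_pairwise_le_of_injective pvKey pvKey_injective
    ?_ (pvPairwiseA xs) (PySem.List.sorted_pairwise xs pvKey)
  exact (pvPermA xs).trans (PySem.List.sorted_perm xs pvKey false).symm
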